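-- pv_equiv track=rewrite | github.com/leolulu/EHauto | 一、画廊筛选下载/ehentai_value_filter.py | match_excluded_tags
-- ===== SOURCE A (Python) =====
-- def _normalize_space(text: str) -> str:
--     return ' '.join(text.strip().split())
--
-- def _tag_variants(tag: str) -> set[str]:
--     """为匹配生成一些等价写法（空格/下划线/加号）。"""
--     base = _normalize_space(tag).lower()
--     if not base:
--         return set()
--     return {
--         base,
--         base.replace(' ', '_'),
--         base.replace(' ', '+'),
--     }
--
-- def match_excluded_tags(excluded: list[str], gallery_tags: list[str]) -> list[str]:
--     """返回命中的排除 tag（按 excluded 顺序）。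
--
--     规则：
--     - excluded 包含 ':' 时：匹配完整 "namespace:tag"（允许空格/下划线/加号写法差异）
--     - excluded 不包含 ':' 时：匹配任意 tag 的 value 部分（namespace 后的部分）
--     """
--     if not excluded or not gallery_tags:
--         return []
--
--     gallery_full_variants: set[str] = set()
--     gallery_value_variants: set[str] = set()
--     for t in gallery_tags:
--         gallery_full_variants |= _tag_variants(t)
--         if ':' in t:
--             _ns, value = t.split(':', 1)
--             gallery_value_variants |= _tag_variants(value)
--
--     hits: list[str] = []
--     for raw in excluded:
--         token = _normalize_space(str(raw)).lower()
--         if not token: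
--             continue
--         if ':' in token:
--             if _tag_variants(token) & gallery_full_variants:
--                 hits.append(token)
--         else:
--             if _tag_variants(token) & gallery_value_variants:
--                 hits.append(token)
--     return hits
-- ===== SOURCE B (Python) =====
-- def _normalize_space(text: str) -> str:
--     return ' '.join(text.strip().split())
--
-- def _tag_variants(tag: str) -> set:
--     base = _normalize_space(tag).lower()
--     if not base:
--         return set()
--     return {base, base.replace(' ', '_'), base.replace(' ', '+')}
--
-- def match_excluded_tags(excluded, gallery_tags):
--     hits = []
--     for raw in excluded:
--         token = _normalize_space(str(raw)).lower()
--         if not token: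
--             continue
--         tv = _tag_variants(token)
--         if ':' in token:
--             for t in gallery_tags:
--                 if tv & _tag_variants(t):
--                     hits.append(token)
--                     break
--         else:
--             for t in gallery_tags:
--                 if ':' in t and tv & _tag_variants(t.split(':', 1)[1]):
--                     hits.append(token)
--                     break
--     return hits
-- ===== Notes on version B (the rewrite author's own statement) =====
-- stated objective: simpler
-- what changed: B drops A's precomputed global full/value variant sets and instead, for each excluded token in order, scans the gallery tags directly (comparing variant sets per tag, value-part only for ':'-containing tags) and appends on the first hit; the empty-list early return disappears because the per-token scan yields [] naturally.
import Mathlib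
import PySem

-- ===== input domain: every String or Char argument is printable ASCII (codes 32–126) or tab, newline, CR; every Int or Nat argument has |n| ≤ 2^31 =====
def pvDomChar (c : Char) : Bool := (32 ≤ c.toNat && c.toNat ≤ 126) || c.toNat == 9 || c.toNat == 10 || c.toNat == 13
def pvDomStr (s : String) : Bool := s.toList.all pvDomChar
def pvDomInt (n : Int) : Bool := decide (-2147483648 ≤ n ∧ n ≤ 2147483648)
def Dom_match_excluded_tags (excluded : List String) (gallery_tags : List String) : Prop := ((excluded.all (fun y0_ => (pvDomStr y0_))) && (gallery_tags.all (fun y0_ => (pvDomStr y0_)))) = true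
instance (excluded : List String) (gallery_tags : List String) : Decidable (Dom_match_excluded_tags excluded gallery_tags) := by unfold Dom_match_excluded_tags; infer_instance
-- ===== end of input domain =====

-- B drops A's two precomputed global variant sets and instead scans the gallery tags
-- directly per excluded token (first hit wins): objective = simpler.

-- ===== PORT A =====
-- _normalize_space(text) = ' '.join(text.strip().split())
def normSpace (s : String) : String :=
  PySem.Str.join " " (PySem.Str.split₀ (PySem.Str.strip s))

-- _tag_variants(tag)
def tagVariants (tag : String) : PySem.Set String :=
  let base := PySem.Str.lower (normSpace tag)
  if base = "" then PySem.Set.empty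
  else PySem.Set.ofList [base, PySem.Str.replace base " " "_", PySem.Str.replace base " " "+"]

-- t.split(':', 1)[1]; only evaluated under an "':' in t" guard, where the split has
-- exactly two parts, so the getD defaults are never the result.
def valPart (t : String) : String :=
  ((PySem.Str.splitMax? t ":" 1).getD []).getD 1 ""

-- body of A's first loop: accumulate (gallery_full_variants, gallery_value_variants)
def aStep (st : PySem.Set String × PySem.Set String) (t : String) :
    PySem.Set String × PySem.Set String :=
  let full := PySem.Set.union st.1 (tagVariants t)
  if PySem.Str.isIn ":" t then
    (full, PySem.Set.union st.2 (tagVariants (valPart t)))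
  else
    (full, st.2)

-- body of A's second loop, over the two precomputed sets
def hitStep (fullS valueS : PySem.Set String) (hits : List String) (raw : String) : List String :=
  let token := PySem.Str.lower (normSpace raw)
  if token = "" then hits
  else if PySem.Str.isIn ":" token then
    if (PySem.Set.inter (tagVariants token) fullS).isEmpty then hits else hits ++ [token]
  else
    if (PySem.Set.inter (tagVariants token) valueS).isEmpty then hits else hits ++ [token]

def match_excluded_tags (excluded : List String) (gallery_tags : List String) : List String :=
  if excluded = [] ∨ gallery_tags = [] then []
  else
    let sets := gallery_tags.foldl aStep (PySem.Set.empty, PySem.Set.empty)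
    excluded.foldl (hitStep sets.1 sets.2) []

-- ===== PORT B =====
-- body of B's loop: scan gallery_tags directly for this token, append on first hit
def bStep (gallery_tags : List String) (hits : List String) (raw : String) : List String :=
  let token := PySem.Str.lower (normSpace raw)
  if token = "" then hits
  else
    let tv := tagVariants token
    if PySem.Str.isIn ":" token then
      if gallery_tags.any (fun t => !(PySem.Set.inter tv (tagVariants t)).isEmpty)
      then hits ++ [token] else hits
    else
      if gallery_tags.any (fun t =>
          PySem.Str.isIn ":" t && !(PySem.Set.inter tv (tagVariants (valPart t))).isEmpty)
      then hits ++ [token] else hits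

def match_excluded_tags_alt (excluded : List String) (gallery_tags : List String) : List String :=
  excluded.foldl (bStep gallery_tags) []

-- ===== PRECONDITION & SPEC =====
def Spec_match_excluded_tags (excluded : List String) (gallery_tags : List String) (out : List String) : Prop := out = match_excluded_tags_alt excluded gallery_tags
instance (excluded : List String) (gallery_tags : List String) (out : List String) : Decidable (Spec_match_excluded_tags excluded gallery_tags out) := by unfold Spec_match_excluded_tags; infer_instance

-- ===== CLAIM (what is proved, stated in full; the proofs are below) =====
def Claim_equal_match_excluded_tags : Prop := ∀ (excluded : List String) (gallery_tags : List String), Dom_match_excluded_tags excluded gallery_tags → Spec_match_excluded_tags excluded gallery_tags (match_excluded_tags excluded gallery_tags)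

-- ===== LEMMAS AND PROOFS =====

lemma aStep_fst (st : PySem.Set String × PySem.Set String) (t : String) :
    (aStep st t).1 = PySem.Set.union st.1 (tagVariants t) := by
  cases h : PySem.Str.isIn ":" t <;>
    simp only [aStep, h, Bool.false_eq_true, if_false, if_true]

lemma aStep_snd (st : PySem.Set String × PySem.Set String) (t : String) :
    (aStep st t).2 = if PySem.Str.isIn ":" t
      then PySem.Set.union st.2 (tagVariants (valPart t)) else st.2 := by
  cases h : PySem.Str.isIn ":" t <;>
    simp only [aStep, h, Bool.false_eq_true, if_false, if_true]

-- membership in the first accumulated set of A's gallery loop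
lemma mem_fold_fst (l : List String) (acc : PySem.Set String × PySem.Set String) (x : String) :
    x ∈ (l.foldl aStep acc).1 ↔ x ∈ acc.1 ∨ ∃ t ∈ l, x ∈ tagVariants t := by
  induction l generalizing acc with
  | nil => simp
  | cons t ts ih =>
    rw [List.foldl_cons, ih, aStep_fst, PySem.Set.mem_union]
    simp only [List.mem_cons]
    constructor
    · rintro ((h | h) | ⟨u, hu, hx⟩)
      · exact Or.inl h
      · exact Or.inr ⟨t, Or.inl rfl, h⟩
      · exact Or.inr ⟨u, Or.inr hu, hx⟩
    · rintro (h | ⟨u, (rfl | hu), hx⟩)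
      · exact Or.inl (Or.inl h)
      · exact Or.inl (Or.inr hx)
      · exact Or.inr ⟨u, hu, hx⟩

-- membership in the second accumulated set of A's gallery loop
lemma mem_fold_snd (l : List String) (acc : PySem.Set String × PySem.Set String) (x : String) :
    x ∈ (l.foldl aStep acc).2 ↔
      x ∈ acc.2 ∨ ∃ t ∈ l, PySem.Str.isIn ":" t = true ∧ x ∈ tagVariants (valPart t) := by
  induction l generalizing acc with
  | nil => simp
  | cons t ts ih =>
    rw [List.foldl_cons, ih, aStep_snd]
    simp only [List.mem_cons]
    by_cases h : PySem.Str.isIn ":" t = true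
    · rw [if_pos h, PySem.Set.mem_union]
      constructor
      · rintro ((hx | hx) | ⟨u, hu, hcu, hx⟩)
        · exact Or.inl hx
        · exact Or.inr ⟨t, Or.inl rfl, h, hx⟩
        · exact Or.inr ⟨u, Or.inr hu, hcu, hx⟩
      · rintro (hx | ⟨u, (rfl | hu), hcu, hx⟩)
        · exact Or.inl (Or.inl hx)
        · exact Or.inl (Or.inr hx)
        · exact Or.inr ⟨u, hu, hcu, hx⟩
    · rw [if_neg h]
      constructor
      · rintro (hx | ⟨u, hu, hcu, hx⟩)
        · exact Or.inl hx
        · exact Or.inr ⟨u, Or.inr hu, hcu, hx⟩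
      · rintro (hx | ⟨u, (rfl | hu), hcu, hx⟩)
        · exact Or.inl hx
        · exact absurd hcu h
        · exact Or.inr ⟨u, hu, hcu, hx⟩

lemma inter_not_isEmpty_iff (s t : PySem.Set String) :
    (PySem.Set.inter s t).isEmpty = false ↔ ∃ x ∈ s, x ∈ t := by
  rw [← Bool.not_eq_true, List.isEmpty_iff]
  constructor
  · intro h
    rcases List.exists_mem_of_ne_nil _ h with ⟨x, hx⟩
    exact ⟨x, (PySem.Set.mem_inter s t x).mp hx⟩
  · rintro ⟨x, hs, ht⟩ hnil
    exact (List.eq_nil_iff_forall_not_mem.mp hnil) x ((PySem.Set.mem_inter s t x).mpr ⟨hs, ht⟩)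

-- A's "variants(token) & gallery_full_variants" test equals B's direct scan (colon tokens)
lemma full_test_iff (gallery_tags : List String) (token : String) :
    (PySem.Set.inter (tagVariants token)
        (gallery_tags.foldl aStep (PySem.Set.empty, PySem.Set.empty)).1).isEmpty = false
      ↔ (gallery_tags.any fun t =>
          !(PySem.Set.inter (tagVariants token) (tagVariants t)).isEmpty) = true := by
  rw [inter_not_isEmpty_iff, List.any_eq_true]
  simp only [Bool.not_eq_true', inter_not_isEmpty_iff]
  constructor
  · rintro ⟨x, hx, hmem⟩
    rcases (mem_fold_fst _ _ _).mp hmem with h | ⟨t, ht, hxt⟩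
    · exact absurd h (by simp [PySem.Set.empty])
    · exact ⟨t, ht, x, hx, hxt⟩
  · rintro ⟨t, ht, x, hx, hxt⟩
    exact ⟨x, hx, (mem_fold_fst _ _ _).mpr (Or.inr ⟨t, ht, hxt⟩)⟩

-- A's "variants(token) & gallery_value_variants" test equals B's direct scan (plain tokens)
lemma value_test_iff (gallery_tags : List String) (token : String) :
    (PySem.Set.inter (tagVariants token)
        (gallery_tags.foldl aStep (PySem.Set.empty, PySem.Set.empty)).2).isEmpty = false
      ↔ (gallery_tags.any fun t => PySem.Str.isIn ":" t &&
          !(PySem.Set.inter (tagVariants token) (tagVariants (valPart t))).isEmpty) = true := by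
  rw [inter_not_isEmpty_iff, List.any_eq_true]
  simp only [Bool.and_eq_true, Bool.not_eq_true', inter_not_isEmpty_iff]
  constructor
  · rintro ⟨x, hx, hmem⟩
    rcases (mem_fold_snd _ _ _).mp hmem with h | ⟨t, ht, hct, hxt⟩
    · exact absurd h (by simp [PySem.Set.empty])
    · exact ⟨t, ht, hct, x, hx, hxt⟩
  · rintro ⟨t, ht, hct, x, hx, hxt⟩
    exact ⟨x, hx, (mem_fold_snd _ _ _).mpr (Or.inr ⟨t, ht, hct, hxt⟩)⟩

-- the two loop bodies agree once A's precomputed sets are unfolded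
lemma step_eq (gallery_tags : List String) (hits : List String) (raw : String) :
    hitStep (gallery_tags.foldl aStep (PySem.Set.empty, PySem.Set.empty)).1
            (gallery_tags.foldl aStep (PySem.Set.empty, PySem.Set.empty)).2 hits raw
      = bStep gallery_tags hits raw := by
  unfold hitStep bStep
  by_cases h0 : PySem.Str.lower (normSpace raw) = ""
  · simp [h0]
  · simp only [h0, if_false]
    by_cases hc : PySem.Str.isIn ":" (PySem.Str.lower (normSpace raw)) = true
    · simp only [hc, if_true]
      rcases hb : gallery_tags.any fun t =>
          !(PySem.Set.inter (tagVariants (PySem.Str.lower (normSpace raw))) (tagVariants t)).isEmpty with _ | _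
      · have ha : (PySem.Set.inter (tagVariants (PySem.Str.lower (normSpace raw)))
            (gallery_tags.foldl aStep (PySem.Set.empty, PySem.Set.empty)).1).isEmpty = true := by
          rcases hcase : (PySem.Set.inter (tagVariants (PySem.Str.lower (normSpace raw)))
              (gallery_tags.foldl aStep (PySem.Set.empty, PySem.Set.empty)).1).isEmpty with _ | _
          · have hx := (full_test_iff gallery_tags _).mp hcase
            rw [hb] at hx
            exact absurd hx (by simp)
          · rfl
        rw [ha]
        simp
      · have ha := (full_test_iff gallery_tags _).mpr hb
        rw [ha]
        simp
    · rw [Bool.not_eq_true] at hc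
      simp only [hc, Bool.false_eq_true, if_false]
      rcases hb : gallery_tags.any fun t => PySem.Str.isIn ":" t &&
          !(PySem.Set.inter (tagVariants (PySem.Str.lower (normSpace raw))) (tagVariants (valPart t))).isEmpty with _ | _
      · have ha : (PySem.Set.inter (tagVariants (PySem.Str.lower (normSpace raw)))
            (gallery_tags.foldl aStep (PySem.Set.empty, PySem.Set.empty)).2).isEmpty = true := by
          rcases hcase : (PySem.Set.inter (tagVariants (PySem.Str.lower (normSpace raw)))
              (gallery_tags.foldl aStep (PySem.Set.empty, PySem.Set.empty)).2).isEmpty with _ | _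
          · have hx := (value_test_iff gallery_tags _).mp hcase
            rw [hb] at hx
            exact absurd hx (by simp)
          · rfl
        rw [ha]
        simp
      · have ha := (value_test_iff gallery_tags _).mpr hb
        rw [ha]
        simp

-- B's whole loop on an empty gallery returns its accumulator unchanged
lemma foldl_bStep_nil (excluded : List String) (acc : List String) :
    excluded.foldl (bStep []) acc = acc := by
  induction excluded generalizing acc with
  | nil => rfl
  | cons r rs ih =>
    rw [List.foldl_cons, show bStep [] acc r = acc from by unfold bStep; simp only [List.any_nil]; split <;> simp, ih]

-- ===== VERDICT (by name: the statement is the Claim_ definition above) =====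
theorem match_excluded_tags_spec : Claim_equal_match_excluded_tags := by
  intro excluded gallery_tags _
  unfold Spec_match_excluded_tags match_excluded_tags match_excluded_tags_alt
  by_cases hex : excluded = []
  · simp [hex]
  · by_cases hg : gallery_tags = []
    · subst hg
      simp only [hex, or_true, if_true]
      rw [foldl_bStep_nil]
    · simp only [hex, hg, or_self, if_false]
      exact PySem.List.foldl_congr_mem excluded _ _ []
        (fun acc x _ => step_eq gallery_tags acc x)
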